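-- pv_equiv track=rewrite | github.com/jonDomino/nba_scanner | spreads/builder.py | get_no_bid_top_and_liquidity
-- ===== SOURCE A (Python) =====
-- from typing import Dict, Any, List, Optional, Tuple
--
-- def get_no_bid_top_and_liquidity(orderbook: Dict[str, Any]) -> Tuple[Optional[int], Optional[int], Dict[int, int]]:
--     """
--     Extract top NO bid price and its liquidity from orderbook.
--
--     Similar to get_yes_bid_top_and_liquidity but for NO side.
--
--     Args:
--         orderbook: Kalshi orderbook dict with "no" bid array (format: [[price_cents, qty], ...])
--
--     Returns:
--         (no_bid_top_c, no_bid_top_liq, no_bids_by_price_dict)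
--         - no_bid_top_c: Maximum NO bid price in cents, or None
--         - no_bid_top_liq: Total liquidity (quantity) at top NO bid price, or None
--         - no_bids_by_price_dict: Dict mapping price -> total quantity for all NO bid levels
--     """
--     no_bids = orderbook.get("no") or []
--
--     if not no_bids or not isinstance(no_bids, list):
--         return (None, None, {})
--
--     # Find max NO bid price and accumulate quantities by price
--     no_bid_top_c = None
--     no_bids_by_price = {}
--
--     for bid in no_bids:
--         if isinstance(bid, list) and len(bid) >= 2:
--             price_cents = int(bid[0])
--             qty = int(bid[1])
--
--             # Track max price
--             if no_bid_top_c is None or price_cents > no_bid_top_c: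
--                 no_bid_top_c = price_cents
--
--             # Accumulate quantities by price (in case multiple entries at same price)
--             if price_cents in no_bids_by_price:
--                 no_bids_by_price[price_cents] += qty
--             else:
--                 no_bids_by_price[price_cents] = qty
--
--     # Get liquidity at top price
--     no_bid_top_liq = no_bids_by_price.get(no_bid_top_c, 0) if no_bid_top_c is not None else None
--
--     return (no_bid_top_c, no_bid_top_liq, no_bids_by_price)
-- ===== SOURCE B (Python) =====
-- def get_no_bid_top_and_liquidity(orderbook):
--     no_bids = orderbook.get("no") or []
--     if not no_bids or not isinstance(no_bids, list):
--         return (None, None, {})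
--     # stage 1: collect the valid (price, qty) pairs
--     pairs = [(int(b[0]), int(b[1])) for b in no_bids
--              if isinstance(b, list) and len(b) >= 2]
--     if not pairs:
--         return (None, None, {})
--     # stage 2: top price and its liquidity as direct reductions over the pairs
--     top = max(p for p, _ in pairs)
--     top_liq = sum(q for p, q in pairs if p == top)
--     # stage 3: group-by — each price (first-occurrence order) maps to the sum
--     # of ALL its quantities, computed by a scan over the pairs
--     table = {}
--     for p, _ in pairs:
--         if p not in table:
--             table[p] = sum(qq for pp, qq in pairs if pp == p)
--     return (top, top_liq, table)
-- ===== Notes on version B (the rewrite author's own statement) =====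
-- stated objective: alternative
-- what changed: B replaces A's single incremental pass (running max + dict accumulation with presence tests) by staged reductions over a filtered pair list: max over the raw prices, liquidity as a filtered sum, and the dict built by group-by, each fresh price getting the sum of all its quantities from a scan over the pairs.
import Mathlib
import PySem

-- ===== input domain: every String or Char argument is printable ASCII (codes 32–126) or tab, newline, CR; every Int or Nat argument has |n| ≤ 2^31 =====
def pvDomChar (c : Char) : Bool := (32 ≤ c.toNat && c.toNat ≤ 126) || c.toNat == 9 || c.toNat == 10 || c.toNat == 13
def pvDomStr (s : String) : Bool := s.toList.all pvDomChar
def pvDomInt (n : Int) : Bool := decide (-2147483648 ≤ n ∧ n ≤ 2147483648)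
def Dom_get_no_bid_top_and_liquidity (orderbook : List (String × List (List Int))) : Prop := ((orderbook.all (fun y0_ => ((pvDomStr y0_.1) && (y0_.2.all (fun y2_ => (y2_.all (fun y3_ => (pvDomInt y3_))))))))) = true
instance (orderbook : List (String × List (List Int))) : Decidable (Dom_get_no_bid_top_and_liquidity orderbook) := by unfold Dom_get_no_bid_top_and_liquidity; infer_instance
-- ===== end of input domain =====

-- B replaces A's single incremental pass by staged reductions over a filtered pair list:
-- max over the raw prices, liquidity as a filtered sum, and a group-by dict where each
-- fresh price gets the sum of all its quantities from a scan over the pairs (objective: alternative).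


-- ===== PORT A =====
-- one loop iteration of A: update the running max and the price->qty dict
def pvStepA (st : Option Int × PySem.Dict Int Int) (bid : List Int) : Option Int × PySem.Dict Int Int :=
  if 2 ≤ bid.length then
    match PySem.List.pyGet? bid 0, PySem.List.pyGet? bid 1 with
    | some price_cents, some qty =>
        let top := match st.1 with
          | none => some price_cents
          | some m => if price_cents > m then some price_cents else some m
        let d := match PySem.Dict.get? st.2 price_cents with
          | some v => PySem.Dict.insert st.2 price_cents (v + qty)   -- price in dict: d[p] += q
          | none => PySem.Dict.insert st.2 price_cents qty           -- else d[p] = q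
        (top, d)
    | _, _ => st   -- unreachable: length ≥ 2 guarantees both indices exist
  else st

def get_no_bid_top_and_liquidity (orderbook : List (String × List (List Int))) : Option Int × Option Int × (List (Int × Int)) :=
  let no_bids := PySem.Dict.getD (PySem.Dict.mk orderbook) "no" []   -- orderbook.get("no") or []
  if no_bids = [] then (none, none, [])
  else
    let st := no_bids.foldl pvStepA (none, PySem.Dict.empty)
    let no_bid_top_liq : Option Int := match st.1 with
      | some t => some (PySem.Dict.getD st.2 t 0)
      | none => none
    (st.1, no_bid_top_liq, st.2.items)

-- ===== PORT B =====
-- the comprehension filter/cast: a valid bid yields its (price, qty) pair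
def pvToPair (bid : List Int) : Option (Int × Int) :=
  if 2 ≤ bid.length then
    match PySem.List.pyGet? bid 0, PySem.List.pyGet? bid 1 with
    | some p, some q => some (p, q)
    | _, _ => none   -- unreachable: length ≥ 2 guarantees both indices exist
  else none

-- sum(qq for pp, qq in pairs if pp == p)
def pvSumQ (pairs : List (Int × Int)) (p : Int) : Int :=
  ((pairs.filter (fun pq => pq.1 == p)).map (fun pq => pq.2)).sum

def get_no_bid_top_and_liquidity_alt (orderbook : List (String × List (List Int))) : Option Int × Option Int × (List (Int × Int)) :=
  let no_bids := PySem.Dict.getD (PySem.Dict.mk orderbook) "no" []   -- orderbook.get("no") or []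
  if no_bids = [] then (none, none, [])
  else
    let pairs := no_bids.filterMap pvToPair                          -- stage 1: the valid pairs
    if pairs = [] then (none, none, [])
    else
      match PySem.List.max? (pairs.map Prod.fst) (fun y => y) with   -- stage 2: max(p for p, _ in pairs)
      | some top =>
          -- stage 3: group-by — fresh price p gets sum of all its quantities
          let table := pairs.foldl
            (fun d pq => if d.contains pq.1 then d else d.insert pq.1 (pvSumQ pairs pq.1))
            PySem.Dict.empty
          (some top, some (pvSumQ pairs top), table.items)
      | none => (none, none, [])   -- unreachable: pairs ≠ []

-- ===== PRECONDITION & SPEC =====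
def Spec_get_no_bid_top_and_liquidity (orderbook : List (String × List (List Int))) (out : Option Int × Option Int × (List (Int × Int))) : Prop := out = get_no_bid_top_and_liquidity_alt orderbook
instance (orderbook : List (String × List (List Int))) (out : Option Int × Option Int × (List (Int × Int))) : Decidable (Spec_get_no_bid_top_and_liquidity orderbook out) := by unfold Spec_get_no_bid_top_and_liquidity; infer_instance

-- ===== CLAIM (what is proved, stated in full; the proofs are below) =====
def Claim_equal_get_no_bid_top_and_liquidity : Prop := ∀ (orderbook : List (String × List (List Int))), Dom_get_no_bid_top_and_liquidity orderbook → Spec_get_no_bid_top_and_liquidity orderbook (get_no_bid_top_and_liquidity orderbook)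

-- ===== LEMMAS AND PROOFS =====

-- A's loop step, re-expressed on a (price, qty) pair, split into two independent accumulators
def pvTopStep (t : Option Int) (pq : Int × Int) : Option Int :=
  match t with
  | none => some pq.1
  | some m => if pq.1 > m then some pq.1 else some m

def pvDictStep (d : PySem.Dict Int Int) (pq : Int × Int) : PySem.Dict Int Int :=
  d.insert pq.1 (d.getD pq.1 0 + pq.2)

def pvStepP (st : Option Int × PySem.Dict Int Int) (pq : Int × Int) : Option Int × PySem.Dict Int Int :=
  (pvTopStep st.1 pq, pvDictStep st.2 pq)

theorem pvStepA_toPair (st : Option Int × PySem.Dict Int Int) (b : List Int) :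
    pvStepA st b = (match pvToPair b with | none => st | some pq => pvStepP st pq) := by
  unfold pvStepA pvToPair pvStepP pvTopStep pvDictStep
  split_ifs with h
  · cases hp : PySem.List.pyGet? b 0 <;> cases hq : PySem.List.pyGet? b 1 <;> simp
    case _ p q =>
      rcases hv : PySem.Dict.get? st.2 p with _ | v
      · simp [PySem.Dict.getD_eq_get?_getD, hv]
      · simp [PySem.Dict.getD_eq_get?_getD, hv]
  · rfl

theorem pvFoldA_eq (bids : List (List Int)) (st : Option Int × PySem.Dict Int Int) :
    bids.foldl pvStepA st = (bids.filterMap pvToPair).foldl pvStepP st := by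
  induction bids generalizing st with
  | nil => rfl
  | cons b t ih =>
      rw [List.foldl_cons, pvStepA_toPair, List.filterMap_cons]
      cases pvToPair b <;> simp [ih]

theorem pvSumQ_append (L : List (Int × Int)) (pq : Int × Int) (p : Int) :
    pvSumQ (L ++ [pq]) p = pvSumQ L p + (if pq.1 = p then pq.2 else 0) := by
  unfold pvSumQ
  rw [List.filter_append]
  by_cases h : pq.1 = p <;> simp [h]

theorem pvSumQ_eq_zero (L : List (Int × Int)) (p : Int) (h : p ∉ L.map Prod.fst) :
    pvSumQ L p = 0 := by
  unfold pvSumQ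
  have : L.filter (fun pq => pq.1 == p) = [] := by
    apply List.filter_eq_nil_iff.mpr
    intro pq hm
    simp only [beq_iff_eq]
    intro hc
    exact h (hc ▸ List.mem_map_of_mem hm)
  rw [this]; rfl

theorem pv_max?_append_singleton (l : List Int) (p : Int) :
    PySem.List.max? (l ++ [p]) (fun y => y) =
      some ((PySem.List.max? l (fun y => y)).elim p (fun m => if p > m then p else m)) := by
  cases l with
  | nil => simp [PySem.List.max?]
  | cons x t =>
      rw [List.cons_append, PySem.List.max?_id_cons, PySem.List.max?_id_cons]
      simp [List.foldl_append]
      omega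

-- A's running max over the pairs is max(p for p, _ in pairs)
theorem pvFoldTop_eq (L : List (Int × Int)) :
    L.foldl pvTopStep none = PySem.List.max? (L.map Prod.fst) (fun y => y) := by
  induction L using List.reverseRecOn with
  | nil => simp [PySem.List.max?]
  | append_singleton L pq ih =>
      rw [List.foldl_append, List.foldl_cons, List.foldl_nil, ih, List.map_append,
          List.map_cons, List.map_nil, pv_max?_append_singleton]
      rcases PySem.List.max? (L.map Prod.fst) (fun y => y) with _ | m
      · rfl
      · simp only [pvTopStep, Option.elim]; split_ifs <;> rfl

-- A's incremental dict over the pairs has the group-by items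
theorem pvFoldDict_items (L : List (Int × Int)) :
    (L.foldl pvDictStep PySem.Dict.empty).items
      = (PySem.Set.ofList (L.map Prod.fst)).map (fun p => (p, pvSumQ L p)) := by
  induction L using List.reverseRecOn with
  | nil => rfl
  | append_singleton L pq ih =>
      rw [List.foldl_append, List.foldl_cons, List.foldl_nil]
      have hkeys : (L.foldl pvDictStep PySem.Dict.empty).keys
          = PySem.Set.ofList (L.map Prod.fst) := by
        rw [PySem.Dict.keys, ih, List.map_map]; simp [Function.comp_def]
      have hnd : (L.foldl pvDictStep PySem.Dict.empty).keys.Nodup := by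
        rw [hkeys]; exact PySem.Set.nodup_ofList _
      rw [List.map_append, List.map_cons, List.map_nil, PySem.Set.ofList_append_singleton]
      by_cases hm : pq.1 ∈ L.map Prod.fst
      · -- existing price: insert overwrites in place, set unchanged
        have hmem : pq.1 ∈ PySem.Set.ofList (L.map Prod.fst) := (PySem.Set.mem_ofList _ _).mpr hm
        have hc : (L.foldl pvDictStep PySem.Dict.empty).contains pq.1 = true := by
          rw [PySem.Dict.contains_eq_decide_mem_keys, hkeys]; exact decide_eq_true hmem
        have hget : (L.foldl pvDictStep PySem.Dict.empty).getD pq.1 0 = pvSumQ L pq.1 :=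
          PySem.Dict.getD_of_mem_items _ (by rw [ih]; exact List.mem_map_of_mem hmem) hnd 0
        have hstep : pvDictStep (L.foldl pvDictStep PySem.Dict.empty) pq
            = (L.foldl pvDictStep PySem.Dict.empty).insert pq.1
                ((L.foldl pvDictStep PySem.Dict.empty).getD pq.1 0 + pq.2) := rfl
        rw [hstep, PySem.Dict.items_insert_of_contains _ _ hc, ih, PySem.Set.add_of_mem hmem,
            List.map_map, hget]
        apply List.map_congr_left
        intro p hp
        by_cases hpe : p = pq.1
        · subst hpe
          simp [pvSumQ_append]
        · have : ¬ pq.1 = p := fun h => hpe h.symm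
          simp [Function.comp, hpe, pvSumQ_append, this]
      · -- fresh price: appended at the end with its total
        have hmem : pq.1 ∉ PySem.Set.ofList (L.map Prod.fst) := fun h =>
          hm ((PySem.Set.mem_ofList _ _).mp h)
        have hc : (L.foldl pvDictStep PySem.Dict.empty).contains pq.1 = false := by
          rw [PySem.Dict.contains_eq_decide_mem_keys, hkeys]; exact decide_eq_false hmem
        have hget : (L.foldl pvDictStep PySem.Dict.empty).getD pq.1 0 = 0 :=
          PySem.Dict.getD_of_not_contains _ _ hc
        have hstep : pvDictStep (L.foldl pvDictStep PySem.Dict.empty) pq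
            = (L.foldl pvDictStep PySem.Dict.empty).insert pq.1
                ((L.foldl pvDictStep PySem.Dict.empty).getD pq.1 0 + pq.2) := rfl
        rw [hstep, PySem.Dict.items_insert_of_not_contains _ _ hc, ih, PySem.Set.add_of_not_mem hmem,
            List.map_append, List.map_cons, List.map_nil, hget]
        congr 1
        · apply List.map_congr_left
          intro p hp
          have hpm : p ∈ L.map Prod.fst := (PySem.Set.mem_ofList _ _).mp hp
          have : ¬ pq.1 = p := fun h => hm (h ▸ hpm)
          simp [pvSumQ_append, this]
        · simp [pvSumQ_append, pvSumQ_eq_zero L pq.1 hm]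

-- B's group-by loop builds the same items (ks carries the keys inserted so far)
theorem pvGrp_items (rest : List (Int × Int)) (full : List (Int × Int))
    (d : PySem.Dict Int Int) (ks : List Int)
    (h : d.items = ks.map (fun p => (p, pvSumQ full p))) :
    (rest.foldl (fun d pq => if d.contains pq.1 then d else d.insert pq.1 (pvSumQ full pq.1)) d).items
      = (rest.foldl (fun ks pq => PySem.Set.add ks pq.1) ks).map (fun p => (p, pvSumQ full p)) := by
  induction rest generalizing d ks with
  | nil => exact h
  | cons pq t ih =>
      rw [List.foldl_cons, List.foldl_cons]
      have hkeys : d.keys = ks := by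
        rw [PySem.Dict.keys, h, List.map_map]; simp [Function.comp_def]
      by_cases hm : pq.1 ∈ ks
      · have hc : d.contains pq.1 = true := by
          rw [PySem.Dict.contains_eq_decide_mem_keys, hkeys]; exact decide_eq_true hm
        rw [if_pos hc, PySem.Set.add_of_mem hm]
        exact ih d ks h
      · have hc : d.contains pq.1 = false := by
          rw [PySem.Dict.contains_eq_decide_mem_keys, hkeys]; exact decide_eq_false hm
        rw [if_neg (by simp [hc]), PySem.Set.add_of_not_mem hm]
        apply ih
        rw [PySem.Dict.items_insert_of_not_contains _ _ hc, h, List.map_append]; rfl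

theorem get_no_bid_top_and_liquidity_eq (orderbook : List (String × List (List Int))) :
    get_no_bid_top_and_liquidity orderbook = get_no_bid_top_and_liquidity_alt orderbook := by
  unfold get_no_bid_top_and_liquidity get_no_bid_top_and_liquidity_alt
  set bids := PySem.Dict.getD (PySem.Dict.mk orderbook) "no" [] with hb
  by_cases hnil : bids = []
  · simp [hnil]
  · simp only [hnil, if_false]
    set pairs := bids.filterMap pvToPair with hp
    rw [pvFoldA_eq]
    have hsplit : pairs.foldl pvStepP (none, PySem.Dict.empty)
        = (pairs.foldl pvTopStep none, pairs.foldl pvDictStep PySem.Dict.empty) := by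
      rw [show pvStepP = (fun (s : Option Int × PySem.Dict Int Int) e =>
            (pvTopStep s.1 e, pvDictStep s.2 e)) from rfl,
          PySem.List.foldl_prod_mk]
    rw [hsplit]
    by_cases hpe : pairs = []
    · simp only [hpe, List.foldl_nil, List.map_nil]
      rfl
    · simp only [hpe, if_false]
      have htop := pvFoldTop_eq pairs
      rcases hmx : PySem.List.max? (pairs.map Prod.fst) (fun y => y) with _ | t
      · exact absurd (List.map_eq_nil_iff.mp ((PySem.List.max?_eq_none_iff _ _).mp hmx)) hpe
      · rw [hmx] at htop
        have htmem : t ∈ pairs.map Prod.fst := PySem.List.max?_mem hmx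
        have hitems := pvFoldDict_items pairs
        have hkeys : (pairs.foldl pvDictStep PySem.Dict.empty).keys
            = PySem.Set.ofList (pairs.map Prod.fst) := by
          rw [PySem.Dict.keys, hitems, List.map_map]; simp [Function.comp_def]
        have hnd : (pairs.foldl pvDictStep PySem.Dict.empty).keys.Nodup := by
          rw [hkeys]; exact PySem.Set.nodup_ofList _
        have hget : (pairs.foldl pvDictStep PySem.Dict.empty).getD t 0 = pvSumQ pairs t :=
          PySem.Dict.getD_of_mem_items _
            (by rw [hitems]; exact List.mem_map_of_mem ((PySem.Set.mem_ofList _ _).mpr htmem)) hnd 0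
        have hgrp := pvGrp_items pairs pairs PySem.Dict.empty [] rfl
        have hks : pairs.foldl (fun ks pq => PySem.Set.add ks pq.1) []
            = PySem.Set.ofList (pairs.map Prod.fst) := by
          rw [← PySem.Set.update_map_eq_foldl_add, PySem.Set.update_nil_left]
        rw [hks] at hgrp
        simp only [htop, hget, hitems, hgrp]

-- ===== VERDICT (by name: the statement is the Claim_ definition above) =====
theorem get_no_bid_top_and_liquidity_spec : Claim_equal_get_no_bid_top_and_liquidity := by
  intro orderbook _
  unfold Spec_get_no_bid_top_and_liquidity
  exact get_no_bid_top_and_liquidity_eq orderbook
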